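-- pv_equiv track=rewrite | github.com/bbkyoo/Algorithm | 프로그래머스/programmus/PythonApplication1/위클리 챌린지/부족한 금액 계산하기.py | solution
-- ===== SOURCE A (Python) =====
-- def solution(price, money, count):
--     price_sum = 0
--     for i in range(1 ,count+1):
--         price_sum += price * i
--
--     if price_sum - money > 0:
--         answer = price_sum - money
--     else:
--         answer = 0
--
--     return answer
-- ===== SOURCE B (Python) =====
-- def solution(price, money, count):
--     n = max(count, 0)
--     total = price * n * (n + 1) // 2
--     return max(total - money, 0)
-- ===== Notes on version B (the rewrite author's own statement) =====
-- stated objective: faster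
-- what changed: Replaces the O(count) accumulation loop by the closed-form arithmetic-series formula price*n*(n+1)//2 and a max with 0.
import Mathlib
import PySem

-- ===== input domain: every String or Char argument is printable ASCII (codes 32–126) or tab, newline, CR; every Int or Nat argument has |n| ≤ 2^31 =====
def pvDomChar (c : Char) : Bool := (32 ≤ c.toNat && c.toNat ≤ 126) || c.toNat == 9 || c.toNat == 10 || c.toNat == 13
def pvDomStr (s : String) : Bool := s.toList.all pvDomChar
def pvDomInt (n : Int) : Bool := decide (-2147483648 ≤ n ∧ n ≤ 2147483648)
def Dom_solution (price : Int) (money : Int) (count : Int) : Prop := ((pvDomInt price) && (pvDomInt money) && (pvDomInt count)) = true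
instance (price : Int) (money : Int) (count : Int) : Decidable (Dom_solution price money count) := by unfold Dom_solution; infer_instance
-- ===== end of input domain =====

-- ===== PORT A =====
def solution (price : Int) (money : Int) (count : Int) : Int :=
  let price_sum := (PySem.List.pyRange 1 (count + 1) 1).foldl (fun s i => s + price * i) 0
  if price_sum - money > 0 then price_sum - money else 0

-- ===== PORT B =====
-- closed-form arithmetic series (B): n = max(count,0), total = price*n*(n+1)//2
def solution_alt (price : Int) (money : Int) (count : Int) : Int :=
  let n := max count 0
  let total := PySem.Int.floordiv (price * n * (n + 1)) 2
  max (total - money) 0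

-- ===== PRECONDITION & SPEC =====
def Spec_solution (price : Int) (money : Int) (count : Int) (out : Int) : Prop := out = solution_alt price money count
instance (price : Int) (money : Int) (count : Int) (out : Int) : Decidable (Spec_solution price money count out) := by unfold Spec_solution; infer_instance

-- ===== CLAIM (what is proved, stated in full; the proofs are below) =====
def Claim_equal_solution : Prop := ∀ (price : Int) (money : Int) (count : Int), Dom_solution price money count → Spec_solution price money count (solution price money count)

-- ===== LEMMAS AND PROOFS =====

theorem fold_sum_two (price : Int) : ∀ (n : Nat) (s : Int),
    ((PySem.List.pyRange 1 ((n : Int) + 1) 1).foldl (fun s i => s + price * i) s) * 2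
      = s * 2 + price * n * (n + 1) := by
  intro n
  induction n with
  | zero => intro s; simp [PySem.List.pyRange_one_eq_nil]
  | succ k ih =>
    intro s
    have h1 : (1 : Int) ≤ (k : Int) + 1 := by omega
    have hsplit := PySem.List.pyRange_one_succ_right (a := 1) (b := (k : Int) + 1) h1
    have hcast : ((k + 1 : Nat) : Int) + 1 = ((k : Int) + 1) + 1 := by push_cast; ring
    rw [hcast, hsplit, List.foldl_append]
    simp only [List.foldl]
    have h := ih s
    push_cast at h ⊢
    linear_combination h

theorem sum_eq (price count : Int) :
    (PySem.List.pyRange 1 (count + 1) 1).foldl (fun s i => s + price * i) 0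
      = PySem.Int.floordiv (price * max count 0 * (max count 0 + 1)) 2 := by
  have hmax : max count 0 = (count.toNat : Int) := by omega
  have h2 := fold_sum_two price count.toNat 0
  have hc : ((count.toNat : Int) + 1) = count + 1 ∨ count + 1 ≤ 1 := by omega
  have hkey : (PySem.List.pyRange 1 (count + 1) 1).foldl (fun s i => s + price * i) 0 * 2
      = price * (count.toNat : Int) * ((count.toNat : Int) + 1) := by
    rcases hc with h | h
    · rw [← h]; simpa using h2
    · rw [PySem.List.pyRange_one_eq_nil h]
      have : (count.toNat : Int) = 0 := by omega
      simp [this]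
  rw [hmax]
  have : price * (count.toNat : Int) * ((count.toNat : Int) + 1)
      = 2 * ((PySem.List.pyRange 1 (count + 1) 1).foldl (fun s i => s + price * i) 0) := by omega
  rw [this, PySem.Int.floordiv, Int.mul_fdiv_cancel_left _ (by norm_num)]

-- ===== VERDICT (by name: the statement is the Claim_ definition above) =====
theorem solution_spec : Claim_equal_solution := by
  intro price money count _
  unfold Spec_solution solution solution_alt
  simp only []
  rw [sum_eq price count]
  omega
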